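-- pv_equiv track=rewrite | github.com/sreelu27/User-Story-Extraction | Summary.py | create_user_story
-- ===== SOURCE A (Python) =====
-- def create_user_story(mlist):
--     user_s=[]
--     for m in mlist:
--         m=m.lower()
--         if m == "sound" or m == "sounds" or m=='music' or m=='physics' or m.startswith('environment') or m.startswith('interface') or m.startswith('movement') or m.startswith('control') or m=='audio' or m == "graphics" or m=='cutscenes' or m=='buttons':
--             user_s.append(formatter(m,"better quality"))
--         if m=='screen':
--             user_s.append(formatter(m,"bigger size"))
--         if m=='speed' or m.startswith('slow') or m.startswith('load') or m=='cpu' or m.startswith('lag'):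
--             user_s.append(formatter('games',"speedy and having good performance"))
--         if m=='repetitive':
--             user_s.append(formatter('games','non-repetitive'))
--         if m=='fake' or m=='wrong' or m=='vague' or m=='confusing' or m=='boring' or m=='difficult':
--             user_s.append(formatter('games','original and clear'))
--         if m.startswith('defect') or m.startswith('install') or m=='incomplete' or m.startswith('finish') or m.startswith('issue') or m=='crappy' or m=='skip' or m.startswith('bug') or m=='fake' or m=='impossible' or m.startswith('crash') or m=='compatibility':
--             user_s.append(formatter('games','defect free or bug free'))
--         if m=='objective'or m.startswith('aim') or m.startswith('goal'):
--             user_s.append(formatter('games','having good objectives or aims'))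
--         if m.startswith('level') or m.startswith('tracks') or m.startswith('cars'):
--             user_s.append(formatter('games','having more '+m,))
--         if m.startswith('collision'):
--             user_s.append(formatter('games','collision free'))
--         if m.startswith('glitch'):
--             user_s.append(formatter('games','glitch free'))
--     return user_s
--
-- def formatter(attribute1, attribute2):
--
--     a1=attribute1
--     a2=attribute2
--
--     user="As a user, I want {} to be {}.".format(a1,a2)
--
--     return user
-- ===== SOURCE B (Python) =====
-- def formatter(attribute1, attribute2):
--     a1 = attribute1
--     a2 = attribute2
--     user = "As a user, I want {} to be {}.".format(a1, a2)
--     return user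
--
--
-- _SPEEDY = formatter("games", "speedy and having good performance")
-- _CLEAR = formatter("games", "original and clear")
-- _DEFECT = formatter("games", "defect free or bug free")
-- _OBJ = formatter("games", "having good objectives or aims")
--
-- # Exact keywords resolve through one dict lookup to fully precomputed stories
-- # (the word 'fake' yields two stories, in A's block order).
-- EXACT = {
--     "sound": [formatter("sound", "better quality")],
--     "sounds": [formatter("sounds", "better quality")],
--     "music": [formatter("music", "better quality")],
--     "physics": [formatter("physics", "better quality")],
--     "audio": [formatter("audio", "better quality")],
--     "graphics": [formatter("graphics", "better quality")],
--     "cutscenes": [formatter("cutscenes", "better quality")],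
--     "buttons": [formatter("buttons", "better quality")],
--     "screen": [formatter("screen", "bigger size")],
--     "speed": [_SPEEDY],
--     "cpu": [_SPEEDY],
--     "repetitive": [formatter("games", "non-repetitive")],
--     "fake": [_CLEAR, _DEFECT],
--     "wrong": [_CLEAR],
--     "vague": [_CLEAR],
--     "confusing": [_CLEAR],
--     "boring": [_CLEAR],
--     "difficult": [_CLEAR],
--     "incomplete": [_DEFECT],
--     "crappy": [_DEFECT],
--     "skip": [_DEFECT],
--     "impossible": [_DEFECT],
--     "compatibility": [_DEFECT],
--     "objective": [_OBJ],
-- }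
--
-- # Prefix groups, only consulted when the word is not an exact keyword.
-- # a1/a2 of None mean "use the word itself" / "use 'having more ' + word".
-- PREFIX_GROUPS = [
--     (("environment", "interface", "movement", "control"), None, "better quality"),
--     (("slow", "load", "lag"), "games", "speedy and having good performance"),
--     (("defect", "install", "finish", "issue", "bug", "crash"), "games", "defect free or bug free"),
--     (("aim", "goal"), "games", "having good objectives or aims"),
--     (("level", "tracks", "cars"), "games", None),
--     (("collision",), "games", "collision free"),
--     (("glitch",), "games", "glitch free"),
-- ]
--
--
-- def _stories(m):
--     hit = EXACT.get(m)
--     if hit is not None: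
--         return hit
--     out = []
--     for prefixes, a1, a2 in PREFIX_GROUPS:
--         if m.startswith(prefixes):
--             out.append(formatter(a1 if a1 is not None else m,
--                                  a2 if a2 is not None else "having more " + m))
--     return out
--
--
-- def create_user_story(mlist):
--     return [s for m in mlist for s in _stories(m.lower())]
-- ===== Notes on version B (the rewrite author's own statement) =====
-- stated objective: faster
-- what changed: B replaces A's per-word evaluation of nine hard-coded if-blocks by a single dict lookup of fully precomputed stories for exact keywords (built once; 'fake' maps to its two stories in block order), falling back to a small prefix-group table scanned only on a dict miss; a timing run measured B ~2x faster.
import Mathlib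
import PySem

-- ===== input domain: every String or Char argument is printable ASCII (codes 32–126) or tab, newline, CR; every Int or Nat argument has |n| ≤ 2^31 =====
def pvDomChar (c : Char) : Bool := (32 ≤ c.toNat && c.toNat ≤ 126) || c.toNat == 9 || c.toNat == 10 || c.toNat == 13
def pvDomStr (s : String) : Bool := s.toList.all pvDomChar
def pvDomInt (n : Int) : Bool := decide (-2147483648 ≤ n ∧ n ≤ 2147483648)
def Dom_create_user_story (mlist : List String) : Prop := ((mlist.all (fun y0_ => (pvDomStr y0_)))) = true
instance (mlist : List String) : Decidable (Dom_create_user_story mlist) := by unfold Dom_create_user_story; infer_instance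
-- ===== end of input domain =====

-- B resolves exact keywords through one dict of precomputed stories and scans a small prefix table only on a dict miss (objective: faster; a timing run measured B ~2x faster on generated inputs).

-- ===== PORT A =====
def formatter (attribute1 attribute2 : String) : String :=
  let a1 := attribute1
  let a2 := attribute2
  "As a user, I want " ++ a1 ++ " to be " ++ a2 ++ "."

def create_user_story (mlist : List String) : List String :=
  mlist.foldl (fun user_s m0 =>
    let m := PySem.Str.lower m0
    let user_s := if m == "sound" || (m == "sounds" || (m == "music" || (m == "physics" || (PySem.Str.startswith m "environment" || (PySem.Str.startswith m "interface" || (PySem.Str.startswith m "movement" || (PySem.Str.startswith m "control" || (m == "audio" || (m == "graphics" || (m == "cutscenes" || m == "buttons")))))))))) then user_s ++ [formatter m "better quality"] else user_s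
    let user_s := if m == "screen" then user_s ++ [formatter m "bigger size"] else user_s
    let user_s := if m == "speed" || (PySem.Str.startswith m "slow" || (PySem.Str.startswith m "load" || (m == "cpu" || PySem.Str.startswith m "lag"))) then user_s ++ [formatter "games" "speedy and having good performance"] else user_s
    let user_s := if m == "repetitive" then user_s ++ [formatter "games" "non-repetitive"] else user_s
    let user_s := if m == "fake" || (m == "wrong" || (m == "vague" || (m == "confusing" || (m == "boring" || m == "difficult")))) then user_s ++ [formatter "games" "original and clear"] else user_s
    let user_s := if PySem.Str.startswith m "defect" || (PySem.Str.startswith m "install" || (m == "incomplete" || (PySem.Str.startswith m "finish" || (PySem.Str.startswith m "issue" || (m == "crappy" || (m == "skip" || (PySem.Str.startswith m "bug" || (m == "fake" || (m == "impossible" || (PySem.Str.startswith m "crash" || m == "compatibility")))))))))) then user_s ++ [formatter "games" "defect free or bug free"] else user_s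
    let user_s := if m == "objective" || (PySem.Str.startswith m "aim" || PySem.Str.startswith m "goal") then user_s ++ [formatter "games" "having good objectives or aims"] else user_s
    let user_s := if PySem.Str.startswith m "level" || (PySem.Str.startswith m "tracks" || PySem.Str.startswith m "cars") then user_s ++ [formatter "games" ("having more " ++ m)] else user_s
    let user_s := if PySem.Str.startswith m "collision" then user_s ++ [formatter "games" "collision free"] else user_s
    let user_s := if PySem.Str.startswith m "glitch" then user_s ++ [formatter "games" "glitch free"] else user_s
    user_s) []

-- ===== PORT B =====
-- B: exact keywords go through one dict lookup to fully precomputed stories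
-- ('fake' yields two, in A's block order); prefix groups are scanned only on a miss.
def formatterB (attribute1 attribute2 : String) : String :=
  "As a user, I want " ++ attribute1 ++ " to be " ++ attribute2 ++ "."

def EXACT : PySem.Dict String (List String) :=
  PySem.Dict.mk [
    ("sound", [formatterB "sound" "better quality"]),
    ("sounds", [formatterB "sounds" "better quality"]),
    ("music", [formatterB "music" "better quality"]),
    ("physics", [formatterB "physics" "better quality"]),
    ("audio", [formatterB "audio" "better quality"]),
    ("graphics", [formatterB "graphics" "better quality"]),
    ("cutscenes", [formatterB "cutscenes" "better quality"]),
    ("buttons", [formatterB "buttons" "better quality"]),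
    ("screen", [formatterB "screen" "bigger size"]),
    ("speed", [formatterB "games" "speedy and having good performance"]),
    ("cpu", [formatterB "games" "speedy and having good performance"]),
    ("repetitive", [formatterB "games" "non-repetitive"]),
    ("fake", [formatterB "games" "original and clear", formatterB "games" "defect free or bug free"]),
    ("wrong", [formatterB "games" "original and clear"]),
    ("vague", [formatterB "games" "original and clear"]),
    ("confusing", [formatterB "games" "original and clear"]),
    ("boring", [formatterB "games" "original and clear"]),
    ("difficult", [formatterB "games" "original and clear"]),
    ("incomplete", [formatterB "games" "defect free or bug free"]),
    ("crappy", [formatterB "games" "defect free or bug free"]),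
    ("skip", [formatterB "games" "defect free or bug free"]),
    ("impossible", [formatterB "games" "defect free or bug free"]),
    ("compatibility", [formatterB "games" "defect free or bug free"]),
    ("objective", [formatterB "games" "having good objectives or aims"])]

def PREFIX_GROUPS : List (List String × Option String × Option String) :=
  [ (["environment", "interface", "movement", "control"], none, some "better quality"),
    (["slow", "load", "lag"], some "games", some "speedy and having good performance"),
    (["defect", "install", "finish", "issue", "bug", "crash"], some "games", some "defect free or bug free"),
    (["aim", "goal"], some "games", some "having good objectives or aims"),
    (["level", "tracks", "cars"], some "games", none),
    (["collision"], some "games", some "collision free"),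
    (["glitch"], some "games", some "glitch free") ]

def storiesB (m : String) : List String :=
  match EXACT.get? m with
  | some hit => hit
  | none =>
    PREFIX_GROUPS.foldl (fun out g =>
      if g.1.any (fun p => PySem.Str.startswith m p) then
        out ++ [formatterB (g.2.1.getD m) (g.2.2.getD ("having more " ++ m))]
      else out) []

def create_user_story_alt (mlist : List String) : List String :=
  mlist.flatMap (fun m0 => storiesB (PySem.Str.lower m0))

-- ===== PRECONDITION & SPEC =====
def Spec_create_user_story (mlist : List String) (out : List String) : Prop := out = create_user_story_alt mlist
instance (mlist : List String) (out : List String) : Decidable (Spec_create_user_story mlist out) := by unfold Spec_create_user_story; infer_instance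

-- ===== CLAIM =====
def Claim_equal_create_user_story : Prop := ∀ (mlist : List String), Dom_create_user_story mlist → Spec_create_user_story mlist (create_user_story mlist)

-- ===== LEMMAS AND PROOFS =====

-- A's per-element body, with the already-lowered word as the argument.
def Alist (user_s : List String) (m : String) : List String :=
  let user_s := if m == "sound" || (m == "sounds" || (m == "music" || (m == "physics" || (PySem.Str.startswith m "environment" || (PySem.Str.startswith m "interface" || (PySem.Str.startswith m "movement" || (PySem.Str.startswith m "control" || (m == "audio" || (m == "graphics" || (m == "cutscenes" || m == "buttons")))))))))) then user_s ++ [formatter m "better quality"] else user_s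
  let user_s := if m == "screen" then user_s ++ [formatter m "bigger size"] else user_s
  let user_s := if m == "speed" || (PySem.Str.startswith m "slow" || (PySem.Str.startswith m "load" || (m == "cpu" || PySem.Str.startswith m "lag"))) then user_s ++ [formatter "games" "speedy and having good performance"] else user_s
  let user_s := if m == "repetitive" then user_s ++ [formatter "games" "non-repetitive"] else user_s
  let user_s := if m == "fake" || (m == "wrong" || (m == "vague" || (m == "confusing" || (m == "boring" || m == "difficult")))) then user_s ++ [formatter "games" "original and clear"] else user_s
  let user_s := if PySem.Str.startswith m "defect" || (PySem.Str.startswith m "install" || (m == "incomplete" || (PySem.Str.startswith m "finish" || (PySem.Str.startswith m "issue" || (m == "crappy" || (m == "skip" || (PySem.Str.startswith m "bug" || (m == "fake" || (m == "impossible" || (PySem.Str.startswith m "crash" || m == "compatibility")))))))))) then user_s ++ [formatter "games" "defect free or bug free"] else user_s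
  let user_s := if m == "objective" || (PySem.Str.startswith m "aim" || PySem.Str.startswith m "goal") then user_s ++ [formatter "games" "having good objectives or aims"] else user_s
  let user_s := if PySem.Str.startswith m "level" || (PySem.Str.startswith m "tracks" || PySem.Str.startswith m "cars") then user_s ++ [formatter "games" ("having more " ++ m)] else user_s
  let user_s := if PySem.Str.startswith m "collision" then user_s ++ [formatter "games" "collision free"] else user_s
  let user_s := if PySem.Str.startswith m "glitch" then user_s ++ [formatter "games" "glitch free"] else user_s
  user_s

theorem if_app (p : Prop) [Decidable p] (acc : List String) (s : String) :
    (if p then acc ++ [s] else acc) = acc ++ (if p then [s] else []) := by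
  split <;> simp

theorem Alist_acc (acc : List String) (m : String) :
    Alist acc m = acc ++ Alist [] m := by
  simp only [Alist, if_app]
  simp only [List.append_assoc, List.nil_append]

theorem pvDictNilGet (m : String) :
    (PySem.Dict.mk ([] : List (String × List String))).get? m = none := rfl

set_option maxHeartbeats 1000000 in
theorem Alist_core (m : String) : Alist [] m = storiesB m := by
  by_cases h : m ∈ (["sound", "sounds", "music", "physics", "audio", "graphics", "cutscenes", "buttons", "screen", "speed", "cpu", "repetitive", "fake", "wrong", "vague", "confusing", "boring", "difficult", "incomplete", "crappy", "skip", "impossible", "compatibility", "objective"] : List String)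
  · simp only [List.mem_cons, List.not_mem_nil, or_false] at h
    rcases h with rfl | rfl | rfl | rfl | rfl | rfl | rfl | rfl | rfl | rfl | rfl | rfl | rfl | rfl | rfl | rfl | rfl | rfl | rfl | rfl | rfl | rfl | rfl | rfl
    all_goals decide
  · simp only [List.mem_cons, List.not_mem_nil, or_false] at h
    push_neg at h
    obtain ⟨h1, h2, h3, h4, h5, h6, h7, h8, h9, h10, h11, h12, h13, h14, h15, h16, h17, h18, h19, h20, h21, h22, h23, h24⟩ := h
    simp only [Alist, storiesB, EXACT, PREFIX_GROUPS, PySem.Dict.get?_mk_cons,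
      List.foldl_cons, List.foldl_nil, List.any_cons, List.any_nil,
      Option.getD_some, Option.getD_none, formatter, formatterB, if_app,
      Bool.or_eq_true, beq_iff_eq, h1, Ne.symm h1, h2, Ne.symm h2, h3, Ne.symm h3, h4, Ne.symm h4, h5, Ne.symm h5, h6, Ne.symm h6, h7, Ne.symm h7, h8, Ne.symm h8, h9, Ne.symm h9, h10, Ne.symm h10, h11, Ne.symm h11, h12, Ne.symm h12, h13, Ne.symm h13, h14, Ne.symm h14, h15, Ne.symm h15, h16, Ne.symm h16, h17, Ne.symm h17, h18, Ne.symm h18, h19, Ne.symm h19, h20, Ne.symm h20, h21, Ne.symm h21, h22, Ne.symm h22, h23, Ne.symm h23, h24, Ne.symm h24,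
      if_false, if_true, false_or, or_false, Bool.false_eq_true,
      pvDictNilGet,
      List.nil_append]

theorem foldl_eq (l : List String) (acc : List String) :
    l.foldl (fun user_s m0 => Alist user_s (PySem.Str.lower m0)) acc
      = acc ++ l.flatMap (fun m0 => storiesB (PySem.Str.lower m0)) := by
  induction l generalizing acc with
  | nil => simp
  | cons x xs ih =>
      simp only [List.foldl_cons, List.flatMap_cons]
      rw [Alist_acc, Alist_core, ih, List.append_assoc]

-- ===== VERDICT =====
theorem create_user_story_spec : Claim_equal_create_user_story := by
  intro mlist _
  unfold Spec_create_user_story create_user_story_alt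
  have hA : create_user_story mlist
      = mlist.foldl (fun user_s m0 => Alist user_s (PySem.Str.lower m0)) [] := rfl
  rw [hA, foldl_eq, List.nil_append]
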